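-- pv_equiv track=rewrite | github.com/Kehvarl/adventofcode_2015 | 11.1-Corporate/Corporate.py | double_letter
-- ===== SOURCE A (Python) =====
-- def double_letter(input_string):
--     pairs = []
--     match = input_string[0]
--     for index in range(1, len(input_string)):
--         letter = input_string[index]
--         if letter == match:
--             pairs.append(index)
--         else:
--             match = letter
--
--     for pair in pairs:
--         if any(elem > (pair + 1) for elem in pairs):
--             return True
--     return False
-- ===== SOURCE B (Python) =====
-- def double_letter(input_string):
--     # A's running 'match' is always the previous character, so the pair indices
--     # are exactly {i : s[i] == s[i-1]}.  The whole test only needs the first and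
--     # the last such index, so scan from each end and stop at the first hit.
--     first = None
--     for i in range(1, len(input_string)):
--         if input_string[i] == input_string[i - 1]:
--             first = i
--             break
--     if first is None:
--         return False
--     for j in range(len(input_string) - 1, 0, -1):
--         if input_string[j] == input_string[j - 1]:
--             return j > first + 1
--     return False
-- ===== Notes on version B (the rewrite author's own statement) =====
-- stated objective: faster
-- what changed: B replaces A's full pairs list plus quadratic any-over-pairs scan with two early-exit scans that find only the first and the last adjacent-repeat index and test last > first + 1.
import Mathlib
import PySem

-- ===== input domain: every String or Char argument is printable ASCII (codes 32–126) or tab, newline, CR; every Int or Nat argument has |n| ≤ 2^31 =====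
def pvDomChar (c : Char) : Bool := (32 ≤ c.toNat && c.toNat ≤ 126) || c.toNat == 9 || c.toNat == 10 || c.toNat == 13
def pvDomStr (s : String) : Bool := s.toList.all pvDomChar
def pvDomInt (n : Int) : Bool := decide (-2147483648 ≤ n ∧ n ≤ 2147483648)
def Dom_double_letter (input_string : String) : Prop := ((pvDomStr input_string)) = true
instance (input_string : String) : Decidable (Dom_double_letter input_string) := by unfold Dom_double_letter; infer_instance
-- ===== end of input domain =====

-- B finds only the first and last adjacent-repeat index, scanning in from each end with
-- early exit, instead of building A's full pairs list and the quadratic any-over-pairs scan.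

-- ===== PORT A =====
-- first loop of A: walk the remaining characters with a running index, collecting pair indices
def dlA_loop : List Char → Char → Int → List Int → List Int
  | [], _, _, pairs => pairs
  | c :: cs, m, i, pairs =>
    if c = m then dlA_loop cs m (i + 1) (pairs ++ [i])
    else dlA_loop cs c (i + 1) pairs

def double_letter (input_string : String) : Bool :=
  match input_string.toList with
  | [] => false   -- Python raises IndexError here; excluded by Pre_
  | m :: rest =>
    let pairs := dlA_loop rest m 1 []
    -- second loop with early return: exists pair with some elem > pair + 1
    pairs.any (fun pair => pairs.any (fun elem => decide (elem > pair + 1)))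

-- ===== PORT B =====
-- first loop of B: scan left-to-right for the first index whose char repeats the previous one
def dlB_first : List Char → Int → Option Int
  | c1 :: c2 :: rest, i => if c2 = c1 then some i else dlB_first (c2 :: rest) (i + 1)
  | _, _ => none

-- second loop of B: scan right-to-left (try the suffix first) for the last such index
def dlB_last : List Char → Int → Option Int
  | c1 :: c2 :: rest, i =>
    match dlB_last (c2 :: rest) (i + 1) with
    | some j => some j
    | none => if c2 = c1 then some i else none
  | _, _ => none

def double_letter_alt (input_string : String) : Bool :=
  match dlB_first input_string.toList 1 with
  | none => false
  | some first =>
    match dlB_last input_string.toList 1 with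
    | some j => decide (j > first + 1)
    | none => false

-- ===== PRECONDITION & SPEC =====
-- Pre_ excludes only the empty string, on which Python A raises IndexError at input_string[0].
def Pre_double_letter (input_string : String) : Prop := input_string ≠ ""
instance (input_string : String) : Decidable (Pre_double_letter input_string) := by unfold Pre_double_letter; infer_instance
def pvWitness_double_letter : String := "aabcc"

def Spec_double_letter (input_string : String) (out : Bool) : Prop := out = double_letter_alt input_string
instance (input_string : String) (out : Bool) : Decidable (Spec_double_letter input_string out) := by unfold Spec_double_letter; infer_instance

-- ===== CLAIM (what is proved, stated in full; the proofs are below) =====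
def Claim_equal_double_letter : Prop := ∀ (input_string : String), Dom_double_letter input_string → Pre_double_letter input_string → Spec_double_letter input_string (double_letter input_string)

-- ===== LEMMAS AND PROOFS =====

-- the list of adjacent-repeat indices (m is the previous character, i the current index)
def pairsOf : List Char → Char → Int → List Int
  | [], _, _ => []
  | c :: cs, m, i => (if c = m then [i] else []) ++ pairsOf cs c (i + 1)

-- A's loop computes exactly pairsOf (its 'match' is always the previous character)
theorem dlA_eq_pairsOf (cs : List Char) : ∀ (m : Char) (i : Int) (pairs : List Int),
    dlA_loop cs m i pairs = pairs ++ pairsOf cs m i := by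
  induction cs with
  | nil => intro m i pairs; simp [dlA_loop, pairsOf]
  | cons c cs ih =>
    intro m i pairs
    simp only [dlA_loop, pairsOf]
    by_cases h : c = m
    · rw [if_pos h, if_pos h, ih, h, List.append_assoc]
    · rw [if_neg h, if_neg h, ih, List.nil_append]

-- B's left scan is the head of pairsOf
theorem dlB_first_eq (cs : List Char) : ∀ (c1 : Char) (i : Int),
    dlB_first (c1 :: cs) i = (pairsOf cs c1 i).head? := by
  induction cs with
  | nil => intro c1 i; simp [dlB_first, pairsOf]
  | cons c2 cs ih =>
    intro c1 i
    simp only [dlB_first, pairsOf]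
    by_cases h : c2 = c1
    · rw [if_pos h, if_pos h]; rfl
    · rw [if_neg h, if_neg h, List.nil_append]; exact ih _ _

-- B's right scan is the last of pairsOf
theorem dlB_last_eq (cs : List Char) : ∀ (c1 : Char) (i : Int),
    dlB_last (c1 :: cs) i = (pairsOf cs c1 i).getLast? := by
  induction cs with
  | nil => intro c1 i; simp [dlB_last, pairsOf]
  | cons c2 cs ih =>
    intro c1 i
    simp only [dlB_last, pairsOf]
    rw [ih]
    by_cases h : c2 = c1
    · rw [if_pos h, if_pos h]
      cases hp : pairsOf cs c2 (i + 1) with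
      | nil => simp
      | cons x xs =>
        rw [show ([i] ++ x :: xs) = i :: x :: xs from rfl, List.getLast?_cons_cons]
        obtain ⟨j, hj⟩ : ∃ j, (x :: xs).getLast? = some j :=
          ⟨(x :: xs).getLast (by simp), by simp [List.getLast?_eq_some_getLast]⟩
        rw [hj]
    · rw [if_neg h, if_neg h, List.nil_append]
      cases hgl : (pairsOf cs c2 (i + 1)).getLast? <;> rfl

-- A's pairs list stays strictly sorted (elements appended in increasing index order)
theorem dlA_sorted (cs : List Char) : ∀ (m : Char) (i : Int) (pairs : List Int),
    pairs.Pairwise (· < ·) → (∀ x ∈ pairs, x < i) →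
    (dlA_loop cs m i pairs).Pairwise (· < ·) := by
  induction cs with
  | nil => intro m i pairs hs _; simpa [dlA_loop] using hs
  | cons c cs ih =>
    intro m i pairs hs hlt
    simp only [dlA_loop]
    by_cases h : c = m
    · rw [if_pos h]
      apply ih
      · exact List.pairwise_append.mpr ⟨hs, List.pairwise_singleton _ _, by
          intro a ha b hb; simp at hb; subst hb; exact hlt a ha⟩
      · intro x hx
        rcases List.mem_append.mp hx with h' | h'
        · have := hlt x h'; omega
        · simp at h'; omega
    · rw [if_neg h]
      apply ih
      · exact hs
      · intro x hx; have := hlt x hx; omega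

-- in a strictly sorted list, every element is at most the last
theorem mem_le_getLast (L : List Int) : ∀ (hne : L ≠ []), L.Pairwise (· < ·) →
    ∀ x ∈ L, x ≤ L.getLast hne := by
  induction L with
  | nil => intro h; exact absurd rfl h
  | cons a t ih =>
    intro hne hL x hx
    cases t with
    | nil => simp at hx; simp [hx, List.getLast]
    | cons b r =>
      have hgl : (a :: b :: r).getLast hne = (b :: r).getLast (by simp) := rfl
      rcases List.mem_cons.mp hx with hx | hx
      · subst hx
        have h1 := (List.pairwise_cons.mp hL).1 _ (List.getLast_mem (l := b :: r) (by simp))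
        rw [hgl]; omega
      · rw [hgl]; exact ih (by simp) (List.pairwise_cons.mp hL).2 x hx

-- for a strictly sorted list, the quadratic any-any test equals last > head + 1
theorem any_any_sorted (L : List Int) (hL : L.Pairwise (· < ·)) :
    (L.any (fun pair => L.any (fun elem => decide (elem > pair + 1)))) =
      (match L.head?, L.getLast? with
       | some f, some l => decide (l > f + 1)
       | _, _ => false) := by
  cases L with
  | nil => simp
  | cons a t =>
    have hne : (a :: t) ≠ [] := by simp
    have hlast : (a :: t).getLast? = some ((a :: t).getLast hne) := by
      simp [List.getLast?_eq_some_getLast]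
    simp only [List.head?_cons, hlast]
    have hmin : ∀ x ∈ a :: t, a ≤ x := by
      intro x hx
      rcases List.mem_cons.mp hx with hx | hx
      · omega
      · exact le_of_lt ((List.pairwise_cons.mp hL).1 x hx)
    have hmax := mem_le_getLast _ hne hL
    have key : ((a :: t).any (fun pair => (a :: t).any (fun elem => decide (elem > pair + 1))) = true)
        ↔ ((a :: t).getLast hne > a + 1) := by
      simp only [List.any_eq_true, decide_eq_true_eq]
      constructor
      · rintro ⟨p, hp, e, he, hpe⟩
        have h1 := hmin p hp
        have h2 := hmax e he
        omega
      · intro h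
        exact ⟨a, List.mem_cons_self, (a :: t).getLast hne, List.getLast_mem hne, h⟩
    rw [Bool.eq_iff_iff, key]
    simp

-- pairsOf is strictly sorted (transferred from A's loop invariant dlA_sorted below)
theorem pairsOf_sorted (cs : List Char) (m : Char) (i : Int) :
    (pairsOf cs m i).Pairwise (· < ·) := by
  have := dlA_sorted cs m i [] (by simp) (by simp)
  rwa [dlA_eq_pairsOf, List.nil_append] at this

-- ===== VERDICT (by name: the statement is the Claim_ definition above) =====
theorem double_letter_spec : Claim_equal_double_letter := by
  intro s _ _
  unfold Spec_double_letter double_letter double_letter_alt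
  cases hcs : s.toList with
  | nil => simp [dlB_first]
  | cons m rest =>
    simp only [dlB_first_eq, dlB_last_eq]
    rw [dlA_eq_pairsOf, List.nil_append, any_any_sorted _ (pairsOf_sorted rest m 1)]
    cases (pairsOf rest m 1).head? <;> cases (pairsOf rest m 1).getLast? <;> rfl
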